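-- pv_equiv track=rewrite | github.com/albinasivtsova15/Pythontasks | Lab2/Task1.10.py | count_strikes
-- ===== SOURCE A (Python) =====
-- def count_strikes(N, K, strikes):
--     strike_days = set()
--
--     for i in range(1, N + 1):
--         for j in range(K):
--             if (i - strikes[j][0]) % strikes[j][1] == 0 and i % 7 not in {6, 1}:
--                 strike_days.add(i)
--                 break
--
--     return len(strike_days)
-- ===== SOURCE B (Python) =====
-- def count_strikes(N, K, strikes):
--     if N < 1:
--         return 0
--     days = set()
--     for a, b in strikes[:max(K, 0)]:
--         m = abs(b)
--         r = a % m
--         first = r if r else m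
--         for day in range(first, N + 1, m):
--             if day % 7 not in (6, 1):
--                 days.add(day)
--     return len(days)
-- ===== Notes on version B (the rewrite author's own statement) =====
-- stated objective: faster
-- what changed: B enumerates each strike's arithmetic progression of days directly (start = least positive residue of a mod |b|, step |b|) into a shared set, instead of testing every day 1..N against every strike.
import Mathlib
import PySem

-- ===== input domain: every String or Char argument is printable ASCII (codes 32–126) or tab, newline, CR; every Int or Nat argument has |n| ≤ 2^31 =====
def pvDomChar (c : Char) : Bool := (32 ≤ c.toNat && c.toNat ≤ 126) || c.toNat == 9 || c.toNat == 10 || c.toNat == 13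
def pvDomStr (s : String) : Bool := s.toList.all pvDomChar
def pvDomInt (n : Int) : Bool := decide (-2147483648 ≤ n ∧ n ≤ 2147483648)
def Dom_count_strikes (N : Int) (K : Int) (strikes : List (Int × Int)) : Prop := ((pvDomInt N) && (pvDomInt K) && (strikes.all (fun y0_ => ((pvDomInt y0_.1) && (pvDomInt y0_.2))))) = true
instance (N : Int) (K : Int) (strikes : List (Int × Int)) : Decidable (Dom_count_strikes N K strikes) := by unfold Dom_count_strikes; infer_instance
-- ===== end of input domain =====

-- B enumerates each strike's arithmetic progression of days directly instead of
-- scanning every day 1..N against every strike (a different, progression-based algorithm).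

-- ===== PORT A =====
-- inner 'for j in range(K): if …: strike_days.add(i); break'
def csA_inner (i : Int) (strikes : List (Int × Int)) : List Int → PySem.Set Int → PySem.Set Int
  | [], s => s
  | j :: rest, s =>
      let p := (PySem.List.pyGet? strikes j).getD (0, 1)
      if PySem.Int.mod (i - p.1) p.2 = 0 ∧ ¬(PySem.Int.mod i 7 = 6 ∨ PySem.Int.mod i 7 = 1)
      then PySem.Set.add s i
      else csA_inner i strikes rest s

def count_strikes (N : Int) (K : Int) (strikes : List (Int × Int)) : Int :=
  let days : PySem.Set Int :=
    (PySem.List.pyRange 1 (N + 1) 1).foldl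
      (fun s i => csA_inner i strikes (PySem.List.pyRange 0 K 1) s) PySem.Set.empty
  PySem.Set.len days

-- ===== PORT B =====
-- one strike: walk its arithmetic progression first, first+m, … up to N
def csB_strike (N : Int) (days : PySem.Set Int) (p : Int × Int) : PySem.Set Int :=
  let m := |p.2|
  let r := PySem.Int.mod p.1 m
  let first := if r ≠ 0 then r else m
  (PySem.List.pyRange first (N + 1) m).foldl
    (fun s day => if ¬(PySem.Int.mod day 7 = 6 ∨ PySem.Int.mod day 7 = 1)
                  then PySem.Set.add s day else s) days

def count_strikes_alt (N : Int) (K : Int) (strikes : List (Int × Int)) : Int :=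
  if N < 1 then 0
  else
    PySem.Set.len
      ((PySem.List.slice strikes none (some (max K 0))).foldl (csB_strike N) PySem.Set.empty)

-- ===== PRECONDITION & SPEC =====
-- Pre_ excludes exactly the inputs where A raises: with N ≥ 1 and K ≥ 1 day i = 1 visits
-- every j < K (1 % 7 == 1, so no break), so A raises iff some j < K is out of range
-- (IndexError) or has period 0 (ZeroDivisionError).
def Pre_count_strikes (N : Int) (K : Int) (strikes : List (Int × Int)) : Prop :=
  N ≤ 0 ∨ K ≤ 0 ∨ (K ≤ strikes.length ∧ ∀ p ∈ strikes.take K.toNat, p.2 ≠ 0)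
instance (N : Int) (K : Int) (strikes : List (Int × Int)) : Decidable (Pre_count_strikes N K strikes) := by unfold Pre_count_strikes; infer_instance

def pvWitness_count_strikes : Int × Int × (List (Int × Int)) := (7, 1, [(3, 2)])

def Spec_count_strikes (N : Int) (K : Int) (strikes : List (Int × Int)) (out : Int) : Prop := out = count_strikes_alt N K strikes
instance (N : Int) (K : Int) (strikes : List (Int × Int)) (out : Int) : Decidable (Spec_count_strikes N K strikes out) := by unfold Spec_count_strikes; infer_instance

-- ===== CLAIM (what is proved, stated in full; the proofs are below) =====
def Claim_equal_count_strikes : Prop := ∀ (N : Int) (K : Int) (strikes : List (Int × Int)), Dom_count_strikes N K strikes → Pre_count_strikes N K strikes → Spec_count_strikes N K strikes (count_strikes N K strikes)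

-- ===== LEMMAS AND PROOFS =====

-- generic membership/nodup facts for folds that conditionally Set.add
theorem pv_mem_foldl {beta : Type} (g : PySem.Set Int → beta → PySem.Set Int)
    (P : beta → Int → Prop) (hg : ∀ s b x, x ∈ g s b ↔ x ∈ s ∨ P b x) :
    ∀ (l : List beta) (s : PySem.Set Int) (x : Int),
      x ∈ l.foldl g s ↔ x ∈ s ∨ ∃ b ∈ l, P b x := by
  intro l
  induction l with
  | nil => simp
  | cons b t ih =>
      intro s x
      rw [List.foldl_cons, ih, hg]
      simp only [List.mem_cons]
      constructor
      · rintro ((h | h) | ⟨c, hc, hp⟩)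
        · exact Or.inl h
        · exact Or.inr ⟨b, Or.inl rfl, h⟩
        · exact Or.inr ⟨c, Or.inr hc, hp⟩
      · rintro (h | ⟨c, (rfl | hc), hp⟩)
        · exact Or.inl (Or.inl h)
        · exact Or.inl (Or.inr hp)
        · exact Or.inr ⟨c, hc, hp⟩

theorem pv_nodup_foldl {beta : Type} (g : PySem.Set Int → beta → PySem.Set Int)
    (hg : ∀ s b, s.Nodup → (g s b).Nodup) :
    ∀ (l : List beta) (s : PySem.Set Int), s.Nodup → (l.foldl g s).Nodup := by
  intro l
  induction l with
  | nil => intro s h; simpa using h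
  | cons b t ih => intro s h; exact ih _ (hg s b h)

-- A's inner loop: adds i exactly when some j in js satisfies the condition
theorem pv_memA_inner (i : Int) (strikes : List (Int × Int)) :
    ∀ (js : List Int) (s : PySem.Set Int) (x : Int),
      x ∈ csA_inner i strikes js s ↔ x ∈ s ∨ (x = i ∧ ∃ j ∈ js,
        (PySem.Int.mod (i - ((PySem.List.pyGet? strikes j).getD (0, 1)).1)
            ((PySem.List.pyGet? strikes j).getD (0, 1)).2 = 0 ∧
          ¬(PySem.Int.mod i 7 = 6 ∨ PySem.Int.mod i 7 = 1))) := by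
  intro js
  induction js with
  | nil => simp [csA_inner]
  | cons j t ih =>
      intro s x
      simp only [csA_inner]
      split_ifs with hc
      · rw [PySem.Set.mem_add]
        simp only [List.mem_cons]
        constructor
        · rintro (h | rfl)
          · exact Or.inl h
          · exact Or.inr ⟨rfl, j, Or.inl rfl, hc⟩
        · rintro (h | ⟨rfl, _⟩)
          · exact Or.inl h
          · exact Or.inr rfl
      · rw [ih]
        simp only [List.mem_cons]
        constructor
        · rintro (h | ⟨rfl, c, hc', hp⟩)
          · exact Or.inl h
          · exact Or.inr ⟨rfl, c, Or.inr hc', hp⟩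
        · rintro (h | ⟨rfl, c, (rfl | hc'), hp⟩)
          · exact Or.inl h
          · exact absurd hp hc
          · exact Or.inr ⟨rfl, c, hc', hp⟩

theorem pv_nodupA_inner (i : Int) (strikes : List (Int × Int)) :
    ∀ (js : List Int) (s : PySem.Set Int), s.Nodup → (csA_inner i strikes js s).Nodup := by
  intro js
  induction js with
  | nil => intro s h; simpa [csA_inner] using h
  | cons j t ih =>
      intro s h
      simp only [csA_inner]
      split_ifs
      · exact PySem.Set.nodup_add _ _ h
      · exact ih s h

-- B's per-strike loop: membership
theorem pv_memB_strike (N : Int) (p : Int × Int) (days : PySem.Set Int) (x : Int) :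
    x ∈ csB_strike N days p ↔ x ∈ days ∨
      (x ∈ PySem.List.pyRange
          (if PySem.Int.mod p.1 |p.2| ≠ 0 then PySem.Int.mod p.1 |p.2| else |p.2|)
          (N + 1) |p.2| ∧
        ¬(PySem.Int.mod x 7 = 6 ∨ PySem.Int.mod x 7 = 1)) := by
  show x ∈ List.foldl _ days _ ↔ _
  rw [pv_mem_foldl _ (fun day x => ¬(PySem.Int.mod day 7 = 6 ∨ PySem.Int.mod day 7 = 1) ∧ x = day)
      (by
        intro s b y
        beta_reduce
        by_cases hb : (PySem.Int.mod b 7 = 6 ∨ PySem.Int.mod b 7 = 1)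
        · rw [if_neg (not_not_intro hb)]
          constructor
          · exact fun h => Or.inl h
          · rintro (h | ⟨hw, rfl⟩)
            · exact h
            · exact absurd hb hw
        · rw [if_pos hb, PySem.Set.mem_add]
          constructor
          · rintro (h | rfl)
            · exact Or.inl h
            · exact Or.inr ⟨hb, rfl⟩
          · rintro (h | ⟨_, rfl⟩)
            · exact Or.inl h
            · exact Or.inr rfl)]
  constructor
  · rintro (h | ⟨d, hd, hw, rfl⟩)
    · exact Or.inl h
    · exact Or.inr ⟨hd, hw⟩
  · rintro (h | ⟨hd, hw⟩)
    · exact Or.inl h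
    · exact Or.inr ⟨x, hd, hw, rfl⟩

theorem pv_nodupB_strike (N : Int) (p : Int × Int) (days : PySem.Set Int)
    (h : days.Nodup) : (csB_strike N days p).Nodup := by
  show (List.foldl _ days _).Nodup
  apply pv_nodup_foldl _ _ _ _ h
  intro s b hs
  split_ifs
  · exact hs
  · exact PySem.Set.nodup_add _ _ hs

-- the arithmetic progression of one strike hits exactly the days 1..N it divides
theorem pv_prog_mem (a b N x : Int) (hb : b ≠ 0) :
    x ∈ PySem.List.pyRange
        (if PySem.Int.mod a |b| ≠ 0 then PySem.Int.mod a |b| else |b|) (N + 1) |b| ↔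
      (1 ≤ x ∧ x < N + 1 ∧ PySem.Int.mod (x - a) b = 0) := by
  have hm : (0 : Int) < |b| := abs_pos.mpr hb
  have hmod : PySem.Int.mod (x - a) b = 0 ↔ |b| ∣ (x - a) := by
    rw [PySem.Int.mod_eq_zero_iff_dvd]
    exact (abs_dvd b (x - a)).symm
  set m := |b| with hmdef
  set r := PySem.Int.mod a m with hrdef
  have hr0 : 0 ≤ r := PySem.Int.mod_nonneg a hm
  have hrlt : r < m := PySem.Int.mod_lt a hm
  have hdiva : m ∣ (a - r) := by
    refine ⟨PySem.Int.floordiv a m, ?_⟩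
    have := PySem.Int.floordiv_mul_add_mod a m
    rw [← hrdef] at this
    linarith [this]
  set first := if r ≠ 0 then r else m with hfdef
  rw [PySem.List.mem_pyRange_iff_of_pos hm x, hmod]
  have hf1 : 1 ≤ first := by
    rw [hfdef]; split_ifs with h <;> omega
  have hfm : first ≤ m := by
    rw [hfdef]; split_ifs with h <;> omega
  have hdivf : m ∣ (a - first) := by
    rw [hfdef]; split_ifs with h
    · exact hdiva
    · have h0 : r = 0 := by omega
      rw [h0] at hdiva
      simpa using dvd_sub (by simpa using hdiva) (dvd_refl m)
  constructor
  · rintro ⟨hfx, hxN, k, hk⟩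
    refine ⟨by omega, hxN, ?_⟩
    obtain ⟨q, hq⟩ := hdivf
    exact ⟨k - q, by linarith [hk, hq, mul_sub m k q]⟩
  · rintro ⟨hx1, hxN, k, hk⟩
    obtain ⟨q, hq⟩ := hdivf
    have hxf : x - first = m * (k + q) := by rw [mul_add]; omega
    have hkq : 0 ≤ k + q := by
      by_contra hneg
      have h1 : k + q ≤ -1 := by omega
      have : m * (k + q) ≤ m * (-1) := by
        exact mul_le_mul_of_nonneg_left h1 (le_of_lt hm)
      omega
    refine ⟨?_, hxN, ⟨k + q, hxf⟩⟩
    have : 0 ≤ m * (k + q) := mul_nonneg (le_of_lt hm) hkq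
    omega

-- indices 0 ≤ j < K correspond to elements of strikes.take K.toNat
theorem pv_index_iff (strikes : List (Int × Int)) (K : Int)
    (hK : K ≤ (strikes.length : Int)) (Q : Int × Int → Prop) :
    (∃ j : Int, 0 ≤ j ∧ j < K ∧ Q ((PySem.List.pyGet? strikes j).getD (0, 1))) ↔
      ∃ p ∈ strikes.take K.toNat, Q p := by
  constructor
  · rintro ⟨j, hj0, hjK, hQ⟩
    have hjl : j < (strikes.length : Int) := lt_of_lt_of_le hjK hK
    rw [PySem.List.pyGet?_eq_some_getElem strikes hj0 hjl, Option.getD_some] at hQ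
    have hlen : j.toNat < (strikes.take K.toNat).length := by
      simp only [List.length_take]
      omega
    refine ⟨(strikes.take K.toNat)[j.toNat], List.getElem_mem hlen, ?_⟩
    rwa [List.getElem_take]
  · rintro ⟨p, hp, hQ⟩
    obtain ⟨n, hn, hnp⟩ := List.mem_iff_getElem.mp hp
    have hnlen : n < strikes.length := by
      simp only [List.length_take] at hn; omega
    refine ⟨(n : Int), by omega, ?_, ?_⟩
    · simp only [List.length_take] at hn; omega
    · rw [PySem.List.pyGet?_eq_some_getElem strikes (by omega) (by exact_mod_cast hnlen),
        Option.getD_some]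
      rw [List.getElem_take] at hnp
      simpa [hnp] using hQ

-- ===== VERDICT (by name: the statement is the Claim_ definition above) =====
theorem count_strikes_spec : Claim_equal_count_strikes := by
  intro N K strikes _ hpre
  unfold Spec_count_strikes count_strikes count_strikes_alt
  by_cases hN : N < 1
  · rw [if_pos hN]
    rw [show PySem.List.pyRange 1 (N + 1) 1 = [] from
      PySem.List.pyRange_one_eq_nil (by omega)]
    rfl
  · rw [if_neg hN]
    have hAmem := pv_mem_foldl
      (fun s i => csA_inner i strikes (PySem.List.pyRange 0 K 1) s)
      (fun i x => x = i ∧ ∃ j ∈ PySem.List.pyRange 0 K 1,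
        (PySem.Int.mod (i - ((PySem.List.pyGet? strikes j).getD (0, 1)).1)
            ((PySem.List.pyGet? strikes j).getD (0, 1)).2 = 0 ∧
          ¬(PySem.Int.mod i 7 = 6 ∨ PySem.Int.mod i 7 = 1)))
      (fun s i x => pv_memA_inner i strikes _ s x)
      (PySem.List.pyRange 1 (N + 1) 1) PySem.Set.empty
    have hBmem := pv_mem_foldl (csB_strike N)
      (fun p x => x ∈ PySem.List.pyRange
          (if PySem.Int.mod p.1 |p.2| ≠ 0 then PySem.Int.mod p.1 |p.2| else |p.2|)
          (N + 1) |p.2| ∧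
        ¬(PySem.Int.mod x 7 = 6 ∨ PySem.Int.mod x 7 = 1))
      (fun s p x => pv_memB_strike N p s x)
      (PySem.List.slice strikes none (some (max K 0))) PySem.Set.empty
    have hslice : PySem.List.slice strikes none (some (max K 0)) = strikes.take K.toNat := by
      rw [PySem.List.slice_to strikes (le_max_right K 0)]
      congr 1
      omega
    have hmem : ∀ x : Int,
        x ∈ (PySem.List.pyRange 1 (N + 1) 1).foldl
              (fun s i => csA_inner i strikes (PySem.List.pyRange 0 K 1) s) PySem.Set.empty ↔
        x ∈ (PySem.List.slice strikes none (some (max K 0))).foldl (csB_strike N)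
              PySem.Set.empty := by
      intro x
      rw [hAmem, hBmem, hslice]
      simp only [PySem.Set.empty, List.not_mem_nil, false_or]
      constructor
      · rintro ⟨i, hi, rfl, j, hj, hcond, hweek⟩
        rw [PySem.List.mem_pyRange_one] at hi hj
        rcases hpre with h | h | ⟨hK, hnz⟩
        · omega
        · omega
        · obtain ⟨p, hp, hQ⟩ := (pv_index_iff strikes K hK
            (fun p => PySem.Int.mod (x - p.1) p.2 = 0)).mp ⟨j, hj.1, hj.2, hcond⟩
          refine ⟨p, hp, ?_, hweek⟩
          rw [pv_prog_mem p.1 p.2 N x (hnz p hp)]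
          exact ⟨hi.1, hi.2, hQ⟩
      · rintro ⟨p, hp, hrange, hweek⟩
        rcases hpre with h | h | ⟨hK, hnz⟩
        · omega
        · have : K.toNat = 0 := by omega
          rw [this] at hp; simp at hp
        · rw [pv_prog_mem p.1 p.2 N x (hnz p hp)] at hrange
          obtain ⟨j, hj0, hjK, hQ⟩ := (pv_index_iff strikes K hK
            (fun p => PySem.Int.mod (x - p.1) p.2 = 0)).mpr ⟨p, hp, hrange.2.2⟩
          refine ⟨x, ?_, rfl, j, ?_, hQ, hweek⟩
          · rw [PySem.List.mem_pyRange_one]; exact ⟨hrange.1, hrange.2.1⟩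
          · rw [PySem.List.mem_pyRange_one]; exact ⟨hj0, hjK⟩
    have hAnodup : ((PySem.List.pyRange 1 (N + 1) 1).foldl
        (fun s i => csA_inner i strikes (PySem.List.pyRange 0 K 1) s) PySem.Set.empty).Nodup :=
      pv_nodup_foldl _ (fun s i hs => pv_nodupA_inner i strikes _ s hs) _ _ List.nodup_nil
    have hBnodup : ((PySem.List.slice strikes none (some (max K 0))).foldl (csB_strike N)
        PySem.Set.empty).Nodup :=
      pv_nodup_foldl _ (fun s p hs => pv_nodupB_strike N p s hs) _ _ List.nodup_nil
    have hperm := (List.perm_ext_iff_of_nodup hAnodup hBnodup).mpr hmem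
    show PySem.Set.len _ = PySem.Set.len _
    simp only [PySem.Set.len]
    exact_mod_cast hperm.length_eq
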